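-- pv_equiv track=rewrite | github.com/cosmindolha/m1c1_lidar | read.py | check_packet_checksum
-- ===== SOURCE A (Python) =====
-- def check_packet_checksum(packet):
--     """
--     Validate the packet checksum.
--     According to research notes: XOR each 16-bit pair of bytes except the pair
--     containing the start angle and compare with checksum bytes at position 8-9.
--     """
--     if len(packet) < 10:
--         return False
--
--     chk0 = 0
--     chk1 = 0
--
--     # XOR all byte pairs except the checksum itself (bytes 8-9)
--     for i in range(0, len(packet), 2):
--         if i == 8:  # Skip checksum bytes
--             continue
--         if i + 1 < len(packet):
--             chk0 ^= packet[i]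
--             chk1 ^= packet[i + 1]
--
--     # Compare with checksum at bytes 8-9
--     return (chk0 == packet[8]) and (chk1 == packet[9])
-- ===== SOURCE B (Python) =====
-- def check_packet_checksum(packet):
--     if len(packet) < 10:
--         return False
--     chk0 = 0
--     chk1 = 0
--     pending = None
--     for b in packet[:8] + packet[10:]:
--         if pending is None:
--             pending = b
--         else:
--             chk0 ^= pending
--             chk1 ^= b
--             pending = None
--     return chk0 == packet[8] and chk1 == packet[9]
-- ===== Notes on version B (the rewrite author's own statement) =====
-- stated objective: simpler
-- what changed: B replaces A's index loop over range(0,len,2) with its i==8 skip and i+1<len guard by slicing the checksum pair out (packet[:8] + packet[10:]) and XOR-folding that list in one pairwise state-machine pass with a pending byte.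
import Mathlib
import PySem

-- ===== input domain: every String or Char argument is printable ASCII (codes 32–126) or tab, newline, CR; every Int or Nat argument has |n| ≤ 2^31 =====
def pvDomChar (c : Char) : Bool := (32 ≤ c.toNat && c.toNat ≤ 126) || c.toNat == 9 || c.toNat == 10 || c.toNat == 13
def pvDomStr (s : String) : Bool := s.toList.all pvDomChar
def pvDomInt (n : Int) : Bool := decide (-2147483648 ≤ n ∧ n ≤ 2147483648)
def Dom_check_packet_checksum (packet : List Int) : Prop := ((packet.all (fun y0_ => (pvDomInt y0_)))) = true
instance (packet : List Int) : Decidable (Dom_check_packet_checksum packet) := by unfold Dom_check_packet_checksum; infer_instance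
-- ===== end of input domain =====

-- B slices the checksum pair out of the packet (packet[:8] + packet[10:]) and XOR-folds that in one
-- pairwise pass with a pending byte, instead of A's index loop over range(0, len, 2) with a skip branch.


-- ===== PORT A =====
def check_packet_checksum (packet : List Int) : Bool :=
  if (packet.length : Int) < 10 then false
  else
    let n : Int := (packet.length : Int)
    let res := (PySem.List.pyRange 0 n 2).foldl
      (fun (c : Int × Int) (i : Int) =>
        if i == 8 then c
        else if i + 1 < n then
          (PySem.Int.bxor c.1 (PySem.List.pyGetD packet i 0),
           PySem.Int.bxor c.2 (PySem.List.pyGetD packet (i + 1) 0))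
        else c) (0, 0)
    (res.1 == PySem.List.pyGetD packet 8 0) && (res.2 == PySem.List.pyGetD packet 9 0)

-- ===== PORT B =====
def check_packet_checksum_alt (packet : List Int) : Bool :=
  if (packet.length : Int) < 10 then false
  else
    let body := PySem.List.slice packet none (some 8) ++ PySem.List.slice packet (some 10) none
    let st := body.foldl
      (fun (s : Int × Int × Option Int) (b : Int) =>
        match s.2.2 with
        | none => (s.1, s.2.1, some b)
        | some p => (PySem.Int.bxor s.1 p, PySem.Int.bxor s.2.1 b, none))
      (0, 0, none)
    (st.1 == PySem.List.pyGetD packet 8 0) && (st.2.1 == PySem.List.pyGetD packet 9 0)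

-- ===== PRECONDITION & SPEC =====
def Spec_check_packet_checksum (packet : List Int) (out : Bool) : Prop := out = check_packet_checksum_alt packet
instance (packet : List Int) (out : Bool) : Decidable (Spec_check_packet_checksum packet out) := by unfold Spec_check_packet_checksum; infer_instance

-- ===== CLAIM (what is proved, stated in full; the proofs are below) =====
def Claim_equal_check_packet_checksum : Prop := ∀ (packet : List Int), Dom_check_packet_checksum packet → Spec_check_packet_checksum packet (check_packet_checksum packet)

-- ===== LEMMAS AND PROOFS =====

def pairXor : List Int → Int × Int → Int × Int
  | a :: b :: t, c => pairXor t (PySem.Int.bxor c.1 a, PySem.Int.bxor c.2 b)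
  | _, c => c

lemma getD_append_nat (pre t : List Int) (j : Nat) (h : j < t.length) :
    PySem.List.pyGetD (pre ++ t) ((pre.length : Int) + (j : Int)) 0 = t[j] := by
  rw [show ((pre.length : Int) + (j : Int)) = ((pre.length + j : Nat) : Int) by push_cast; ring,
    PySem.List.pyGetD_natCast]
  rw [List.getD_eq_getElem?_getD, List.getElem?_append_right (by omega)]
  simp [h]

lemma loopA (l : List Int) (t : List Int) : ∀ pre : List Int, ∀ c : Int × Int, pre ++ t = l → 10 ≤ pre.length →
    ((List.range ((t.length + 1) / 2)).map (fun k : Nat => ((pre.length : Int) + 2 * k))).foldl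
      (fun (c : Int × Int) (i : Int) =>
        if i == 8 then c
        else if i + 1 < (l.length : Int) then
          (PySem.Int.bxor c.1 (PySem.List.pyGetD l i 0),
           PySem.Int.bxor c.2 (PySem.List.pyGetD l (i + 1) 0))
        else c) c
    = pairXor t c := by
  induction t, ((0:Int), (0:Int)) using pairXor.induct with
  | case1 a b t c0 ih =>
    intro pre c hl hlen
    have hsplit : (t.length + 2 + 1) / 2 = (t.length + 1) / 2 + 1 := by omega
    rw [show (a :: b :: t).length = t.length + 2 by simp, hsplit, List.range_succ_eq_map,
      List.map_cons, List.foldl_cons, List.map_map]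
    have h8 : ¬ (((pre.length : Int) + 2 * (0 : Nat)) == 8) = true := by
      simp only [beq_iff_eq]; push_cast; omega
    have hlt : (pre.length : Int) + 2 * (0 : Nat) + 1 < (l.length : Int) := by
      subst hl; simp only [List.length_append, List.length_cons]; push_cast; omega
    rw [if_neg h8, if_pos hlt]
    have ha : PySem.List.pyGetD l ((pre.length : Int) + 2 * (0 : Nat)) 0 = a := by
      subst hl
      have h0 := getD_append_nat pre (a :: b :: t) 0 (by simp)
      rw [Nat.cast_zero, add_zero] at h0
      rw [Nat.cast_zero, mul_zero, add_zero]
      exact h0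

    have hb : PySem.List.pyGetD l ((pre.length : Int) + 2 * (0 : Nat) + 1) 0 = b := by
      subst hl
      have h1 := getD_append_nat pre (a :: b :: t) 1 (by simp)
      rw [Nat.cast_zero, mul_zero, add_zero]
      rw [Nat.cast_one] at h1
      exact h1
    rw [ha, hb]
    have hmap : (List.map ((fun k : Nat => ((pre.length : Int) + 2 * k)) ∘ Nat.succ) (List.range ((t.length + 1) / 2)))
        = List.map (fun k : Nat => (((pre ++ [a, b]).length : Int) + 2 * k)) (List.range ((t.length + 1) / 2)) := by
      apply List.map_congr_left
      intro k _
      simp only [Function.comp, List.length_append, List.length_cons, List.length_nil]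
      push_cast
      ring
    rw [hmap]
    rw [pairXor]
    exact ih (pre ++ [a, b]) _ (by simpa using hl) (by simp; omega)
  | case2 t c0 hne =>
    intro pre c hl hlen
    match t, hne with
    | a :: b :: t', hne' => exact absurd rfl (hne' a b t')
    | [], _ =>
      simp [pairXor]
    | [a], _ =>
      have h8 : ¬ (((pre.length : Int) + 2 * (0 : Nat)) == 8) = true := by simp only [beq_iff_eq]; push_cast; omega
      have hnlt : ¬ ((pre.length : Int) + 2 * (0 : Nat) + 1 < (l.length : Int)) := by
        subst hl; simp only [List.length_append, List.length_cons, List.length_nil]; push_cast; omega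
      simp only [List.length_cons, List.length_nil]
      rw [show (0 + 1 + 1) / 2 = 1 by norm_num, List.range_one, List.map_singleton,
        List.foldl_cons, if_neg h8, if_neg hnlt]
      simp [pairXor]

lemma rangeSplit (r : Nat) :
    PySem.List.pyRange 0 (((10 + r : Nat) : Int)) 2
      = [0, 2, 4, 6, 8] ++ (List.range ((r + 1) / 2)).map (fun k : Nat => ((10 : Int) + 2 * k)) := by
  rw [PySem.List.pyRange_of_pos 0 _ (by norm_num)]
  rw [if_pos (by push_cast; omega)]
  have hc : (((10 + r : Nat) : Int) - 0 + 2 - 1) / 2 = ((5 + (r + 1) / 2 : Nat) : Int) := by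
    push_cast
    omega
  rw [hc, Int.toNat_natCast, List.range_add]
  simp only [List.map_append, List.map_map]
  congr 1
  · apply List.map_congr_left
    intro k _
    simp only [Function.comp]
    push_cast
    ring

def pend (t : List Int) : Option Int :=
  t.foldl (fun (o : Option Int) b => match o with | none => some b | some _ => none) none

lemma loopB (t : List Int) : ∀ c0 c1 : Int,
    t.foldl
      (fun (s : Int × Int × Option Int) (b : Int) =>
        match s.2.2 with
        | none => (s.1, s.2.1, some b)
        | some p => (PySem.Int.bxor s.1 p, PySem.Int.bxor s.2.1 b, none))
      (c0, c1, none)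
    = ((pairXor t (c0, c1)).1, (pairXor t (c0, c1)).2, pend t) := by
  induction t, ((0 : Int), (0 : Int)) using pairXor.induct with
  | case1 a b t c0' ih =>
    intro c0 c1
    rw [List.foldl_cons, List.foldl_cons]
    rw [show pend (a :: b :: t) = pend t by simp [pend]]
    rw [pairXor]
    exact ih _ _
  | case2 t c_ hne =>
    intro c0 c1
    match t, hne with
    | a :: b :: t', hne' => exact absurd rfl (hne' a b t')
    | [], _ => simp [pairXor, pend]
    | [a], _ => simp [pairXor, pend]

-- ===== VERDICT (by name: the statement is the Claim_ definition above) =====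
theorem check_packet_checksum_spec : Claim_equal_check_packet_checksum := by
  intro packet _
  unfold Spec_check_packet_checksum
  unfold check_packet_checksum check_packet_checksum_alt
  by_cases h : (packet.length : Int) < 10
  · rw [if_pos h, if_pos h]
  · rw [if_neg h, if_neg h]
    have hn : 10 ≤ packet.length := by omega
    rcases packet with _|⟨a0,_|⟨a1,_|⟨a2,_|⟨a3,_|⟨a4,_|⟨a5,_|⟨a6,_|⟨a7,_|⟨a8,_|⟨a9,rest⟩⟩⟩⟩⟩⟩⟩⟩⟩⟩ <;>
      simp only [List.length_cons, List.length_nil] at hn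
    all_goals try omega
    simp only []
    set l := a0 :: a1 :: a2 :: a3 :: a4 :: a5 :: a6 :: a7 :: a8 :: a9 :: rest with hldef
    have hlen : l.length = 10 + rest.length := by simp [hldef]; omega
    -- A side: split the range at index 10 and run the first five indices
    rw [show ((l.length : Nat) : Int) = ((10 + rest.length : Nat) : Int) by rw [hlen]]
    rw [rangeSplit rest.length, List.foldl_append]
    have h1 : (1:Int) < 10 + (rest.length:Int) := by omega
    have h3 : (3:Int) < 10 + (rest.length:Int) := by omega
    have h5 : (5:Int) < 10 + (rest.length:Int) := by omega
    have h7 : (7:Int) < 10 + (rest.length:Int) := by omega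
    have hA : (List.foldl (fun (c : Int × Int) (i : Int) =>
          if (i == 8) = true then c
          else if i + 1 < ((10 + rest.length : Nat) : Int) then
            (PySem.Int.bxor c.1 (PySem.List.pyGetD l i 0), PySem.Int.bxor c.2 (PySem.List.pyGetD l (i + 1) 0))
          else c) ((0:Int), (0:Int)) [0, 2, 4, 6, 8])
        = (PySem.Int.bxor (PySem.Int.bxor (PySem.Int.bxor (PySem.Int.bxor 0 a0) a2) a4) a6,
           PySem.Int.bxor (PySem.Int.bxor (PySem.Int.bxor (PySem.Int.bxor 0 a1) a3) a5) a7) := by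
      simp only [List.foldl_cons, List.foldl_nil]
      simp [h1, h3, h5, h7, hldef, PySem.List.pyGetD_ofNat']
    rw [hA]
    have hloop := loopA l rest [a0, a1, a2, a3, a4, a5, a6, a7, a8, a9]
        (PySem.Int.bxor (PySem.Int.bxor (PySem.Int.bxor (PySem.Int.bxor 0 a0) a2) a4) a6,
         PySem.Int.bxor (PySem.Int.bxor (PySem.Int.bxor (PySem.Int.bxor 0 a1) a3) a5) a7) rfl (by simp)
    rw [show l.length = (10 + rest.length : Nat) from hlen] at hloop
    have hl10 : ((List.length [a0, a1, a2, a3, a4, a5, a6, a7, a8, a9] : Nat) : Int) = 10 := by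
      simp
    simp only [hl10] at hloop
    rw [hloop]
    rw [PySem.List.slice_to l (by norm_num), PySem.List.slice_from l (by norm_num)]
    rw [show ((8:Int).toNat) = 8 from rfl, show ((10:Int).toNat) = 10 from rfl]
    rw [show List.take 8 l = [a0, a1, a2, a3, a4, a5, a6, a7] from by rw [hldef]; rfl,
      show List.drop 10 l = rest from by rw [hldef]; rfl]
    rw [List.foldl_append]
    simp only [List.foldl_cons, List.foldl_nil]
    rw [loopB rest]
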